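-- pv_equiv track=rewrite | github.com/franmassello/utn | TP2.py | puntos_seguidos
-- ===== SOURCE A (Python) =====
-- def puntos_seguidos(mail):
--     valido = False
--     anterior = None
--     for punto in mail:
--         actual = punto
--         if actual == "." and anterior == ".":
--             return valido
--         else:
--             anterior = actual
--     valido = True
--     return valido
-- ===== SOURCE B (Python) =====
-- def puntos_seguidos(mail):
--     return ".." not in mail
-- ===== Notes on version B (the rewrite author's own statement) =====
-- stated objective: idiomatic
-- what changed: Replaced the stateful character-by-character scan tracking the previous character with a single built-in substring membership test for a double dot.
import Mathlib
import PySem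

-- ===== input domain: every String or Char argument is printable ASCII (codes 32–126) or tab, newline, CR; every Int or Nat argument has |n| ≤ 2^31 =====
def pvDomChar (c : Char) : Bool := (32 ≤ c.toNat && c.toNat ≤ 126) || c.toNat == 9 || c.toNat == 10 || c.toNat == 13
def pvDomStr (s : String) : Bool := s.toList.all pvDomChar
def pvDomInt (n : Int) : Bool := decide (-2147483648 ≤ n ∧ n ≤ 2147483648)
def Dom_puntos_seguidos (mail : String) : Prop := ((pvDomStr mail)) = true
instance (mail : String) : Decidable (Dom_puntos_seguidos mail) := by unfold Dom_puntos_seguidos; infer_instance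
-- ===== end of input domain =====

-- B replaces A's stateful previous-character scan with a single substring test '".." not in mail' (idiomatic).

-- ===== PORT A =====
-- the for-loop of A: state 'anterior : Option Char'; returns valido=false on two consecutive dots
def pvLoopA : Option Char → List Char → Bool
  | _, [] => true
  | ant, c :: rest => if c = '.' ∧ ant = some '.' then false else pvLoopA (some c) rest

def puntos_seguidos (mail : String) : Bool := pvLoopA none mail.toList

-- ===== PORT B =====
def puntos_seguidos_alt (mail : String) : Bool := !(PySem.Str.isIn ".." mail)

-- ===== PRECONDITION & SPEC =====
def Spec_puntos_seguidos (mail : String) (out : Bool) : Prop := out = puntos_seguidos_alt mail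
instance (mail : String) (out : Bool) : Decidable (Spec_puntos_seguidos mail out) := by unfold Spec_puntos_seguidos; infer_instance

-- ===== CLAIM (what is proved, stated in full; the proofs are below) =====
def Claim_equal_puntos_seguidos : Prop := ∀ (mail : String), Dom_puntos_seguidos mail → Spec_puntos_seguidos mail (puntos_seguidos mail)

-- ===== LEMMAS AND PROOFS =====

theorem pv_not_infix_short (c : Char) : ¬ (['.', '.'] <:+: [c]) := by
  intro h
  have := h.length_le
  simp at this

theorem pv_single_prefix_iff (l : List Char) : (['.'] <+: l) ↔ l.head? = some '.' := by
  cases l with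
  | nil => simp
  | cons a t => simp [List.cons_prefix_cons, eq_comm]

theorem pv_infix_pair_cons (c : Char) (l : List Char) :
    (['.', '.'] <:+: (c :: l)) ↔ (c = '.' ∧ l.head? = some '.') ∨ ['.', '.'] <:+: l := by
  rw [List.infix_cons_iff, List.cons_prefix_cons, pv_single_prefix_iff, eq_comm]

theorem pv_loop_some (l : List Char) : ∀ c : Char,
    pvLoopA (some c) l = !(PySem.Chars.isIn ['.', '.'] (c :: l)) := by
  induction l with
  | nil =>
    intro c
    have h : PySem.Chars.isIn ['.', '.'] [c] = false :=
      (PySem.Chars.isIn_eq_false_iff _ _).mpr (pv_not_infix_short c)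
    simp [pvLoopA, h]
  | cons d rest ih =>
    intro c
    by_cases hcd : d = '.' ∧ c = '.'
    · have : PySem.Chars.isIn ['.', '.'] (c :: d :: rest) = true := by
        obtain ⟨hd, hc⟩ := hcd
        rw [PySem.Chars.isIn_iff_infix, pv_infix_pair_cons]
        exact Or.inl ⟨hc, by simp [hd]⟩
      simp only [pvLoopA]
      rw [if_pos ⟨hcd.1, by rw [hcd.2]⟩, this, Bool.not_true]
    · have hiff : PySem.Chars.isIn ['.', '.'] (c :: d :: rest)
          = PySem.Chars.isIn ['.', '.'] (d :: rest) := by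
        by_cases h2 : PySem.Chars.isIn ['.', '.'] (d :: rest) = true
        · rw [h2, PySem.Chars.isIn_iff_infix, pv_infix_pair_cons]
          exact Or.inr ((PySem.Chars.isIn_iff_infix _ _).mp h2)
        · rw [Bool.not_eq_true] at h2
          rw [h2, ← Bool.not_eq_true, PySem.Chars.isIn_iff_infix, pv_infix_pair_cons]
          rintro (⟨hc, hd⟩ | hrest)
          · exact hcd ⟨by cases rest <;> simp_all, hc⟩
          · exact absurd ((PySem.Chars.isIn_iff_infix _ _).mpr hrest) (by simp [h2])
      simp only [pvLoopA]
      rw [if_neg (by rintro ⟨h1, h2⟩; exact hcd ⟨h1, by injection h2⟩), ih d, hiff]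

-- ===== VERDICT =====
theorem puntos_seguidos_spec : Claim_equal_puntos_seguidos := by
  intro mail _
  unfold Spec_puntos_seguidos puntos_seguidos puntos_seguidos_alt
  rw [PySem.Str.isIn_eq]
  have hlit : ("..".toList) = ['.', '.'] := by decide
  rw [hlit]
  cases h : mail.toList with
  | nil =>
    have h0 : PySem.Chars.isIn ['.', '.'] ([] : List Char) = false :=
      (PySem.Chars.isIn_eq_false_iff _ _).mpr (fun hinf => by
        have := hinf.length_le; simp at this)
    simp [pvLoopA, h0]
  | cons c rest =>
    rw [show pvLoopA none (c :: rest) = pvLoopA (some c) rest from by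
      simp [pvLoopA]]
    exact pv_loop_some rest c
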